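-- pv_equiv track=rewrite | github.com/walterdd/swift_daddy | swiftdaddy/domainlookup/domain_lookup.py | replacement_search
-- ===== SOURCE A (Python) =====
-- def replacement_search(prescription, choice, query):
--     choice_pointer = 0
--     query_pointer = 0
--     replacements = []
--     i = 0
--     while i < len(prescription):
-- #         print prescription[i]
--         if prescription[i] == 'M':
--             choice_pointer += 1
--             query_pointer += 1
--             i += 1
--         elif prescription[i] == 'R':
--             c_left = choice_pointer
--             c_right = choice_pointer + 1
--             q_left = query_pointer
--             q_right = query_pointer + 1
--             p_left = i - 1
--             p_right = i + 1
-- #             print 'choice - ', choice[c_left:c_right], 'query - ', query[q_left:q_right]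
--             while p_left >= 0:
--                 if prescription[p_left] == 'I':
--                     q_left -= 1
--                     p_left -= 1
--                 elif prescription[p_left] == 'D':
--                     c_left -= 1
--                     p_left -= 1
--                 elif prescription[p_left] == 'R':
--                     c_left -= 1
--                     q_left -= 1
--                     p_left -= 1
--                 else:
--                     break
--             while p_right < len(prescription):
--                 if prescription[p_right] == 'I':
--                     q_right += 1
--                     p_right += 1
--                 elif prescription[p_right] == 'D':
--                     c_right += 1
--                     p_right += 1
--                 elif prescription[p_right] == 'R':
--                     c_right += 1
--                     q_right += 1
--                     p_right += 1
--                 else: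
--                     break
--             replacements.append([choice[c_left:c_right], query[q_left:q_right]])
--             choice_pointer = c_right
--             query_pointer = q_right
--             i = p_right
--         elif prescription[i] == 'I':
--             query_pointer += 1
--             i += 1
--         elif prescription[i] == 'D':
--             choice_pointer += 1
--             i += 1
--     return replacements
-- ===== SOURCE B (Python) =====
-- def replacement_search(prescription, choice, query):
--     # one forward pass: accumulate each non-'M' run and emit its pair iff the run saw an 'R'
--     replacements = []
--     cp = qp = 0          # choice / query pointers
--     c0 = q0 = 0          # run start positions
--     in_run = False
--     has_r = False
--     for ch in prescription:
--         if ch == 'M':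
--             if in_run and has_r:
--                 replacements.append([choice[c0:cp], query[q0:qp]])
--             in_run = False
--             has_r = False
--             cp += 1
--             qp += 1
--         else:
--             if not in_run:
--                 in_run = True
--                 has_r = False
--                 c0, q0 = cp, qp
--             if ch == 'R':
--                 cp += 1
--                 qp += 1
--                 has_r = True
--             elif ch == 'D':
--                 cp += 1
--             elif ch == 'I':
--                 qp += 1
--     if in_run and has_r:
--         replacements.append([choice[c0:cp], query[q0:qp]])
--     return replacements
-- ===== Notes on version B (the rewrite author's own statement) =====
-- stated objective: simpler
-- what changed: A emits a pair only when it reaches an 'R', scanning backward and forward over the surrounding I/D run to recover its bounds; B is a single forward pass that remembers each non-'M' run's start pointers and a has_r flag and emits the pair when the run ends, with no backward scan, no index arithmetic and no slicing re-expansion. Pre_ excludes prescriptions containing characters outside 'MRID', on which A never returns (its while loop no longer advances i and spins forever); B returns normally there.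
import Mathlib
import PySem

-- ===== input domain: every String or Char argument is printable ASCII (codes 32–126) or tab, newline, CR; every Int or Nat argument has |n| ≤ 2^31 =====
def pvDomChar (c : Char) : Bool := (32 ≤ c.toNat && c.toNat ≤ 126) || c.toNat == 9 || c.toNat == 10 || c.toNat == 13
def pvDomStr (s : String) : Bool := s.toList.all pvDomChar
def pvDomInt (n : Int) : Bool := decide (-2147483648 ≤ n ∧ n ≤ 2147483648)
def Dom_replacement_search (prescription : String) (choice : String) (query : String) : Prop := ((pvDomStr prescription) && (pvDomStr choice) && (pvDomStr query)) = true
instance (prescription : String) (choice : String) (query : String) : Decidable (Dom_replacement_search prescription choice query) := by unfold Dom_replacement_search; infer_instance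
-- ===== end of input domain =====

-- B replaces A's R-triggered backward+forward pointer expansion by a single forward pass that
-- accumulates each non-'M' run (start pointers + has_r flag): simpler, same O(n) cost.


-- ===== PORT A =====
-- inner 'while p_left >= 0' loop; fuel = i at call time, enough for the loop to reach
-- p_left = -1, where it stops anyway (the 'none' arm is unreachable: 0 ≤ pl < len there)
def pvABack (p : List Char) : Nat → Int → Int → Int → Int × Int
  | 0, _, cl, ql => (cl, ql)
  | fuel+1, pl, cl, ql =>
    if pl ≥ 0 then
      match PySem.List.pyGet? p pl with
      | none => (cl, ql)
      | some c =>
        if c = 'I' then pvABack p fuel (pl-1) cl (ql-1)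
        else if c = 'D' then pvABack p fuel (pl-1) (cl-1) ql
        else if c = 'R' then pvABack p fuel (pl-1) (cl-1) (ql-1)
        else (cl, ql)
    else (cl, ql)

-- inner 'while p_right < len(prescription)' loop; fuel = len - p_right at call time
def pvAFwd (p : List Char) : Nat → Nat → Int → Int → Int × Int × Nat
  | 0, pr, cr, qr => (cr, qr, pr)
  | fuel+1, pr, cr, qr =>
    if pr < p.length then
      match PySem.List.pyGet? p (pr : Int) with
      | none => (cr, qr, pr)
      | some c =>
        if c = 'I' then pvAFwd p fuel (pr+1) cr (qr+1)
        else if c = 'D' then pvAFwd p fuel (pr+1) (cr+1) qr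
        else if c = 'R' then pvAFwd p fuel (pr+1) (cr+1) (qr+1)
        else (cr, qr, pr)
    else (cr, qr, pr)

-- outer 'while i < len(prescription)' loop; Python has no 'else' arm, so on a character
-- outside 'MRID' it keeps i unchanged and loops forever — modelled by recursing until the
-- fuel runs out (Pre_ excludes those inputs)
def pvAMain (p : List Char) (choice query : String) : Nat → Nat → Int → Int → List (List String) → List (List String)
  | 0, _, _, _, acc => acc
  | fuel+1, i, cp, qp, acc =>
    if i < p.length then
      match PySem.List.pyGet? p (i : Int) with
      | none => acc
      | some c =>
        if c = 'M' then pvAMain p choice query fuel (i+1) (cp+1) (qp+1) acc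
        else if c = 'R' then
          let bk := pvABack p i ((i : Int) - 1) cp qp
          let fw := pvAFwd p (p.length - (i+1)) (i+1) (cp+1) (qp+1)
          pvAMain p choice query fuel fw.2.2 fw.1 fw.2.1
            (acc ++ [[PySem.Str.slice choice (some bk.1) (some fw.1),
                      PySem.Str.slice query (some bk.2) (some fw.2.1)]])
        else if c = 'I' then pvAMain p choice query fuel (i+1) cp (qp+1) acc
        else if c = 'D' then pvAMain p choice query fuel (i+1) (cp+1) qp acc
        else pvAMain p choice query fuel i cp qp acc
    else acc

def replacement_search (prescription : String) (choice : String) (query : String) : List (List String) :=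
  pvAMain prescription.toList choice query (prescription.toList.length + 1) 0 0 0 []

-- ===== PORT B =====
-- B's single forward loop: cp/qp are the choice/query pointers, c0/q0 the run-start
-- pointers, inr = "inside a non-'M' run", hr = "the run has seen an 'R'"
def pvBLoop (choice query : String) : List Char → List (List String) → Int → Int → Int → Int → Bool → Bool → List (List String)
  | [], acc, cp, qp, c0, q0, inr, hr =>
    if inr && hr then
      acc ++ [[PySem.Str.slice choice (some c0) (some cp), PySem.Str.slice query (some q0) (some qp)]]
    else acc
  | ch :: rest, acc, cp, qp, c0, q0, inr, hr =>
    if ch = 'M' then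
      let acc' := if inr && hr then
        acc ++ [[PySem.Str.slice choice (some c0) (some cp), PySem.Str.slice query (some q0) (some qp)]]
      else acc
      pvBLoop choice query rest acc' (cp+1) (qp+1) c0 q0 false false
    else
      let c0' := if inr then c0 else cp
      let q0' := if inr then q0 else qp
      if ch = 'R' then pvBLoop choice query rest acc (cp+1) (qp+1) c0' q0' true true
      else if ch = 'D' then pvBLoop choice query rest acc (cp+1) qp c0' q0' true hr
      else if ch = 'I' then pvBLoop choice query rest acc cp (qp+1) c0' q0' true hr
      else pvBLoop choice query rest acc cp qp c0' q0' true hr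

def replacement_search_alt (prescription : String) (choice : String) (query : String) : List (List String) :=
  pvBLoop choice query prescription.toList [] 0 0 0 0 false false

-- ===== PRECONDITION & SPEC =====
-- Pre_ excludes prescriptions containing a character outside 'MRID': on those the Python A
-- never returns (its while loop stops advancing i and spins forever), so no value is claimed there.
def Pre_replacement_search (prescription : String) (choice : String) (query : String) : Prop :=
  (prescription.toList.all (fun c => c == 'M' || c == 'R' || c == 'I' || c == 'D')) = true

instance (prescription : String) (choice : String) (query : String) : Decidable (Pre_replacement_search prescription choice query) := by
  unfold Pre_replacement_search; infer_instance

def pvWitness_replacement_search : String × String × String := ("MDRIM", "abcd", "wxyz")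

def Spec_replacement_search (prescription : String) (choice : String) (query : String) (out : List (List String)) : Prop := out = replacement_search_alt prescription choice query
instance (prescription : String) (choice : String) (query : String) (out : List (List String)) : Decidable (Spec_replacement_search prescription choice query out) := by unfold Spec_replacement_search; infer_instance

-- ===== CLAIM (what is proved, stated in full; the proofs are below) =====
def Claim_equal_replacement_search : Prop := ∀ (prescription : String) (choice : String) (query : String), Dom_replacement_search prescription choice query → Pre_replacement_search prescription choice query → Spec_replacement_search prescription choice query (replacement_search prescription choice query)

-- ===== LEMMAS AND PROOFS =====

def pvIDR (c : Char) : Bool := c = 'I' || c = 'D' || c = 'R'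

-- structural view of A's backward loop: walking p[pl], p[pl-1], … is walking (p.take (pl+1)).reverse
def pvBackList : List Char → Int → Int → Int × Int
  | [], cl, ql => (cl, ql)
  | c :: m, cl, ql =>
    if c = 'I' then pvBackList m cl (ql-1)
    else if c = 'D' then pvBackList m (cl-1) ql
    else if c = 'R' then pvBackList m (cl-1) (ql-1)
    else (cl, ql)

-- structural view of A's forward loop
def pvFwdList : List Char → Nat → Int → Int → Int × Int × Nat
  | [], pr, cr, qr => (cr, qr, pr)
  | c :: m, pr, cr, qr =>
    if c = 'I' then pvFwdList m (pr+1) cr (qr+1)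
    else if c = 'D' then pvFwdList m (pr+1) (cr+1) qr
    else if c = 'R' then pvFwdList m (pr+1) (cr+1) (qr+1)
    else (cr, qr, pr)

theorem pvABack_eq (p : List Char) (i : Nat) (hi : i ≤ p.length) (cl ql : Int) :
    pvABack p i ((i : Int) - 1) cl ql = pvBackList ((p.take i).reverse) cl ql := by
  induction i generalizing cl ql with
  | zero => simp [pvABack, pvBackList]
  | succ k ih =>
    have hk : k < p.length := by omega
    have hget : PySem.List.pyGet? p (((k+1 : Nat) : Int) - 1) = some p[k] := by
      have he : ((k+1 : Nat) : Int) - 1 = ((k : Nat) : Int) := by push_cast; ring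
      rw [he, PySem.List.pyGet?_natCast]; simp [hk]
    have htake : (p.take (k+1)).reverse = p[k] :: (p.take k).reverse := by
      rw [List.take_add_one]; simp [hk]
    have hpl : ((k+1 : Nat) : Int) - 1 ≥ 0 := by push_cast; omega
    have hdec : ((k+1 : Nat) : Int) - 1 - 1 = ((k : Nat) : Int) - 1 := by push_cast; ring
    rw [htake]
    simp only [pvABack, if_pos hpl, hget]
    rw [pvBackList, hdec]
    by_cases hI : p[k] = 'I'
    · simp [hI, ih (by omega)]
    by_cases hD : p[k] = 'D'
    · simp [hI, hD, ih (by omega)]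
    by_cases hRc : p[k] = 'R'
    · simp [hI, hD, hRc, ih (by omega)]
    · simp [hI, hD, hRc]

theorem pvAFwd_eq (p : List Char) (fuel : Nat) (j : Nat) (hj : j ≤ p.length) (hf : p.length - j ≤ fuel) (cr qr : Int) :
    pvAFwd p fuel j cr qr = pvFwdList (p.drop j) j cr qr := by
  induction fuel generalizing j cr qr with
  | zero =>
    have hje : j = p.length := by omega
    subst hje
    simp [pvAFwd, pvFwdList]
  | succ k ih =>
    by_cases hlt : j < p.length
    · have hget : PySem.List.pyGet? p ((j : Nat) : Int) = some p[j] := by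
        rw [PySem.List.pyGet?_natCast]; simp [hlt]
      rw [List.drop_eq_getElem_cons hlt]
      simp only [pvAFwd, if_pos hlt, hget]
      rw [pvFwdList]
      by_cases hI : p[j] = 'I'
      · simp [hI, ih (j+1) (by omega) (by omega)]
      by_cases hD : p[j] = 'D'
      · simp [hI, hD, ih (j+1) (by omega) (by omega)]
      by_cases hRc : p[j] = 'R'
      · simp [hI, hD, hRc, ih (j+1) (by omega) (by omega)]
      · simp [hI, hD, hRc]
    · have hje : j = p.length := by omega
      subst hje
      simp [pvAFwd, pvFwdList]

-- pvBackList over a prefix of I/D characters followed by a blocked (or empty) tail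
theorem pvBackList_run (r s : List Char) (hr : ∀ c ∈ r, c = 'I' ∨ c = 'D')
    (hs : s = [] ∨ ∃ c t, s = c :: t ∧ pvIDR c = false) (cl ql : Int) :
    pvBackList (r ++ s) cl ql = (cl - (r.count 'D' : Int), ql - (r.count 'I' : Int)) := by
  induction r generalizing cl ql with
  | nil =>
    rcases hs with hnil | ⟨c, t, hct, hc⟩
    · simp [hnil, pvBackList]
    · subst hct
      simp only [pvIDR, Bool.or_eq_false_iff, decide_eq_false_iff_not] at hc
      rw [List.nil_append, pvBackList]
      simp [hc.1.1, hc.1.2, hc.2]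
  | cons c r ih =>
    rcases hr c (by simp) with hc | hc <;> subst hc
    · rw [List.cons_append, pvBackList]
      simp only [if_pos rfl]
      rw [ih (fun c hcm => hr c (by simp [hcm])) cl (ql - 1)]
      simp [List.count_cons]
      omega
    · rw [List.cons_append, pvBackList]
      simp only [reduceIte]
      rw [ih (fun c hcm => hr c (by simp [hcm])) (cl - 1) ql]
      simp [List.count_cons]
      omega

theorem pvFwdList_run (r s : List Char) (hr : ∀ c ∈ r, pvIDR c = true)
    (hs : s = [] ∨ ∃ c t, s = c :: t ∧ pvIDR c = false) (j : Nat) (cr qr : Int) :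
    pvFwdList (r ++ s) j cr qr = (cr + ((r.count 'D' : Int) + (r.count 'R' : Int)), qr + ((r.count 'I' : Int) + (r.count 'R' : Int)), j + r.length) := by
  induction r generalizing j cr qr with
  | nil =>
    rcases hs with hnil | ⟨c, t, hct, hc⟩
    · simp [hnil, pvFwdList]
    · subst hct
      simp only [pvIDR, Bool.or_eq_false_iff, decide_eq_false_iff_not] at hc
      rw [List.nil_append, pvFwdList]
      simp [hc.1.1, hc.1.2, hc.2]
  | cons c r ih =>
    have hc := hr c (by simp)
    have hmem : ∀ x ∈ r, pvIDR x = true := fun x hx => hr x (by simp [hx])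
    simp only [pvIDR, Bool.or_eq_true, decide_eq_true_eq] at hc
    rw [List.cons_append, pvFwdList]
    rcases hc with (hc | hc) | hc <;> subst hc
    · simp only [if_pos rfl]
      rw [ih hmem (j+1) cr (qr+1)]
      simp [List.count_cons, Prod.ext_iff]
      refine ⟨by omega, by omega⟩
    · simp only [reduceIte]
      rw [ih hmem (j+1) (cr+1) qr]
      simp [List.count_cons, Prod.ext_iff]
      refine ⟨by omega, by omega⟩
    · simp only [reduceIte]
      rw [ih hmem (j+1) (cr+1) (qr+1)]
      simp [List.count_cons, Prod.ext_iff]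
      refine ⟨by omega, by omega, by omega⟩

-- when in_run is false the carried run-start pointers are irrelevant to B's loop
theorem pvBLoop_c0_irrel (choice query : String) (l : List Char) (acc : List (List String))
    (cp qp c0 q0 c0' q0' : Int) (hr : Bool) :
    pvBLoop choice query l acc cp qp c0 q0 false hr = pvBLoop choice query l acc cp qp c0' q0' false hr := by
  induction l generalizing acc cp qp hr with
  | nil => simp [pvBLoop]
  | cons c rest ih =>
    rw [pvBLoop, pvBLoop]
    by_cases hM : c = 'M'
    · simp only [if_pos hM, Bool.false_and, Bool.false_eq_true, if_neg (Bool.false_ne_true)]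
      exact ih _ _ _ _
    · simp only [if_neg hM, if_neg (Bool.false_ne_true)]

-- B consumes a run of I/D/R characters with in_run = has_r = true by pure pointer arithmetic
theorem pvBLoop_run (choice query : String) (r rest : List Char) (hr : ∀ c ∈ r, pvIDR c = true)
    (acc : List (List String)) (cp qp c0 q0 : Int) :
    pvBLoop choice query (r ++ rest) acc cp qp c0 q0 true true
      = pvBLoop choice query rest acc (cp + ((r.count 'D' : Int) + (r.count 'R' : Int))) (qp + ((r.count 'I' : Int) + (r.count 'R' : Int))) c0 q0 true true := by
  induction r generalizing cp qp with
  | nil => simp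
  | cons c r ih =>
    have hc := hr c (by simp)
    have hmem : ∀ x ∈ r, pvIDR x = true := fun x hx => hr x (by simp [hx])
    simp only [pvIDR, Bool.or_eq_true, decide_eq_true_eq] at hc
    rw [List.cons_append]
    rcases hc with (hc | hc) | hc <;> subst hc
    · have hstep : pvBLoop choice query ('I' :: (r ++ rest)) acc cp qp c0 q0 true true
          = pvBLoop choice query (r ++ rest) acc cp (qp+1) c0 q0 true true := by
        simp [pvBLoop]
      rw [hstep, ih hmem cp (qp+1)]
      have e1 : cp + ((r.count 'D' : Int) + (r.count 'R' : Int)) = cp + ((('I'::r).count 'D' : Int) + (('I'::r).count 'R' : Int)) := by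
        simp [List.count_cons]
      have e2 : (qp+1) + ((r.count 'I' : Int) + (r.count 'R' : Int)) = qp + ((('I'::r).count 'I' : Int) + (('I'::r).count 'R' : Int)) := by
        simp [List.count_cons]; omega
      rw [e1, e2]
    · have hstep : pvBLoop choice query ('D' :: (r ++ rest)) acc cp qp c0 q0 true true
          = pvBLoop choice query (r ++ rest) acc (cp+1) qp c0 q0 true true := by
        simp [pvBLoop]
      rw [hstep, ih hmem (cp+1) qp]
      have e1 : (cp+1) + ((r.count 'D' : Int) + (r.count 'R' : Int)) = cp + ((('D'::r).count 'D' : Int) + (('D'::r).count 'R' : Int)) := by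
        simp [List.count_cons]; omega
      have e2 : qp + ((r.count 'I' : Int) + (r.count 'R' : Int)) = qp + ((('D'::r).count 'I' : Int) + (('D'::r).count 'R' : Int)) := by
        simp [List.count_cons]
      rw [e1, e2]
    · have hstep : pvBLoop choice query ('R' :: (r ++ rest)) acc cp qp c0 q0 true true
          = pvBLoop choice query (r ++ rest) acc (cp+1) (qp+1) c0 q0 true true := by
        simp [pvBLoop]
      rw [hstep, ih hmem (cp+1) (qp+1)]
      have e1 : (cp+1) + ((r.count 'D' : Int) + (r.count 'R' : Int)) = cp + ((('R'::r).count 'D' : Int) + (('R'::r).count 'R' : Int)) := by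
        simp [List.count_cons]; omega
      have e2 : (qp+1) + ((r.count 'I' : Int) + (r.count 'R' : Int)) = qp + ((('R'::r).count 'I' : Int) + (('R'::r).count 'R' : Int)) := by
        simp [List.count_cons]; omega
      rw [e1, e2]

theorem pvAMain_stop (p : List Char) (choice query : String) (fuel i : Nat) (cp qp : Int)
    (acc : List (List String)) (h : p.length ≤ i) :
    pvAMain p choice query fuel i cp qp acc = acc := by
  cases fuel with
  | zero => rfl
  | succ f =>
    simp only [pvAMain]
    rw [if_neg (by omega)]

theorem pvAMain_stepM (p : List Char) (choice query : String) (f j : Nat) (cp qp : Int)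
    (acc : List (List String)) (hlt : j < p.length) (hM : p[j] = 'M') :
    pvAMain p choice query (f+1) j cp qp acc = pvAMain p choice query f (j+1) (cp+1) (qp+1) acc := by
  have hget : PySem.List.pyGet? p ((j : Nat) : Int) = some 'M' := by
    rw [PySem.List.pyGet?_natCast]; simp [hlt, hM]
  simp [pvAMain, if_pos hlt, hget]

-- main simulation lemma: A's indexed loop equals B's fold, given the run invariant:
-- the maximal I/D/R block just before position i contains no 'R' (A would have jumped past it),
-- c0/q0 are the pointers at that block's start, and inr says whether the block is non-empty
theorem pvMain_eq (p : List Char) (choice query : String)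
    (hp : ∀ c ∈ p, c = 'M' ∨ c = 'R' ∨ c = 'I' ∨ c = 'D') :
    ∀ fuel i cp qp acc c0 q0 inr, i ≤ p.length → p.length - i ≤ fuel →
    'R' ∉ ((p.take i).reverse.takeWhile pvIDR) →
    c0 = cp - (((p.take i).reverse.takeWhile pvIDR).count 'D' : Int) →
    q0 = qp - (((p.take i).reverse.takeWhile pvIDR).count 'I' : Int) →
    inr = !((p.take i).reverse.takeWhile pvIDR).isEmpty →
    pvAMain p choice query fuel i cp qp acc = pvBLoop choice query (p.drop i) acc cp qp c0 q0 inr false := by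
  intro fuel
  induction fuel using Nat.strong_induction_on with
  | _ fuel IH =>
  intro i cp qp acc c0 q0 inr hi hf hR hc0 hq0 hinr
  by_cases hlt : i < p.length
  · obtain ⟨f, rfl⟩ : ∃ f, fuel = f + 1 := ⟨fuel - 1, by omega⟩
    have hget : PySem.List.pyGet? p ((i : Nat) : Int) = some p[i] := by
      rw [PySem.List.pyGet?_natCast]; simp [hlt]
    have hdrop : p.drop i = p[i] :: p.drop (i+1) := List.drop_eq_getElem_cons hlt
    have htake : (p.take (i+1)).reverse = p[i] :: (p.take i).reverse := by
      rw [List.take_add_one]; simp [hlt]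
    have hC : (if inr = true then c0 else cp) = cp - (((p.take i).reverse.takeWhile pvIDR).count 'D' : Int) := by
      cases hib : ((p.take i).reverse.takeWhile pvIDR).isEmpty with
      | true =>
        rw [hinr, hib]
        simp [List.isEmpty_iff.mp hib]
      | false =>
        rw [hinr, hib]
        simpa using hc0
    have hQ : (if inr = true then q0 else qp) = qp - (((p.take i).reverse.takeWhile pvIDR).count 'I' : Int) := by
      cases hib : ((p.take i).reverse.takeWhile pvIDR).isEmpty with
      | true =>
        rw [hinr, hib]
        simp [List.isEmpty_iff.mp hib]
      | false =>
        rw [hinr, hib]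
        simpa using hq0
    rcases hp p[i] (List.getElem_mem hlt) with h | h | h | h
    · -- p[i] = 'M'
      have hstepA : pvAMain p choice query (f+1) i cp qp acc = pvAMain p choice query f (i+1) (cp+1) (qp+1) acc :=
        pvAMain_stepM p choice query f i cp qp acc hlt h
      have hback : ((p.take (i+1)).reverse.takeWhile pvIDR) = [] := by
        rw [htake, h]; simp [List.takeWhile_cons, pvIDR]
      rw [hstepA,
        IH f (by omega) (i+1) (cp+1) (qp+1) acc (cp+1) (qp+1) false (by omega) (by omega)
          (by simp [hback]) (by simp [hback]) (by simp [hback]) (by simp [hback])]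
      rw [hdrop, h]
      have hstepB : pvBLoop choice query ('M' :: p.drop (i+1)) acc cp qp c0 q0 inr false
          = pvBLoop choice query (p.drop (i+1)) acc (cp+1) (qp+1) c0 q0 false false := by
        simp [pvBLoop]
      rw [hstepB]
      exact pvBLoop_c0_irrel choice query _ acc (cp+1) (qp+1) (cp+1) (qp+1) c0 q0 false
    · -- p[i] = 'R'
      have hbmem : ∀ c ∈ (p.take i).reverse.takeWhile pvIDR, c = 'I' ∨ c = 'D' := by
        intro c hcmem
        have h1 : pvIDR c = true := List.mem_takeWhile_imp hcmem
        have h2 : c ≠ 'R' := fun hrr => hR (hrr ▸ hcmem)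
        simp only [pvIDR, Bool.or_eq_true, decide_eq_true_eq] at h1
        tauto
      have hbs : (p.take i).reverse.dropWhile pvIDR = [] ∨
          ∃ c t, (p.take i).reverse.dropWhile pvIDR = c :: t ∧ pvIDR c = false := by
        rcases hdw : (p.take i).reverse.dropWhile pvIDR with _ | ⟨c, t⟩
        · exact Or.inl rfl
        · refine Or.inr ⟨c, t, rfl, ?_⟩
          have hh := List.head?_dropWhile_not pvIDR (p.take i).reverse
          rw [hdw] at hh; simpa using hh
      have hbk : pvABack p i ((i : Int) - 1) cp qp
          = (cp - (((p.take i).reverse.takeWhile pvIDR).count 'D' : Int),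
             qp - (((p.take i).reverse.takeWhile pvIDR).count 'I' : Int)) := by
        rw [pvABack_eq p i (le_of_lt hlt) cp qp]
        conv_lhs => rw [← List.takeWhile_append_dropWhile (p := pvIDR) (l := (p.take i).reverse)]
        exact pvBackList_run _ _ hbmem hbs cp qp
      have hrun : ∀ c ∈ (p.drop (i+1)).takeWhile pvIDR, pvIDR c = true :=
        fun c hcm => List.mem_takeWhile_imp hcm
      have hs2 : (p.drop (i+1)).dropWhile pvIDR = [] ∨
          ∃ c t, (p.drop (i+1)).dropWhile pvIDR = c :: t ∧ pvIDR c = false := by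
        rcases hdw : (p.drop (i+1)).dropWhile pvIDR with _ | ⟨c, t⟩
        · exact Or.inl rfl
        · refine Or.inr ⟨c, t, rfl, ?_⟩
          have hh := List.head?_dropWhile_not pvIDR (p.drop (i+1))
          rw [hdw] at hh; simpa using hh
      have hfw : pvAFwd p (p.length - (i+1)) (i+1) (cp+1) (qp+1)
          = ((cp+1) + ((((p.drop (i+1)).takeWhile pvIDR).count 'D' : Int) + (((p.drop (i+1)).takeWhile pvIDR).count 'R' : Int)),
             (qp+1) + ((((p.drop (i+1)).takeWhile pvIDR).count 'I' : Int) + (((p.drop (i+1)).takeWhile pvIDR).count 'R' : Int)),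
             (i+1) + ((p.drop (i+1)).takeWhile pvIDR).length) := by
        rw [pvAFwd_eq p (p.length - (i+1)) (i+1) hlt le_rfl (cp+1) (qp+1)]
        conv_lhs => rw [← List.takeWhile_append_dropWhile (p := pvIDR) (l := p.drop (i+1))]
        exact pvFwdList_run _ _ hrun hs2 (i+1) (cp+1) (qp+1)
      have hstepA : pvAMain p choice query (f+1) i cp qp acc
          = pvAMain p choice query f ((i+1) + ((p.drop (i+1)).takeWhile pvIDR).length)
              ((cp+1) + ((((p.drop (i+1)).takeWhile pvIDR).count 'D' : Int) + (((p.drop (i+1)).takeWhile pvIDR).count 'R' : Int)))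
              ((qp+1) + ((((p.drop (i+1)).takeWhile pvIDR).count 'I' : Int) + (((p.drop (i+1)).takeWhile pvIDR).count 'R' : Int)))
              (acc ++ [[PySem.Str.slice choice (some (cp - (((p.take i).reverse.takeWhile pvIDR).count 'D' : Int)))
                          (some ((cp+1) + ((((p.drop (i+1)).takeWhile pvIDR).count 'D' : Int) + (((p.drop (i+1)).takeWhile pvIDR).count 'R' : Int)))),
                        PySem.Str.slice query (some (qp - (((p.take i).reverse.takeWhile pvIDR).count 'I' : Int)))
                          (some ((qp+1) + ((((p.drop (i+1)).takeWhile pvIDR).count 'I' : Int) + (((p.drop (i+1)).takeWhile pvIDR).count 'R' : Int))))]]) := by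
        simp [pvAMain, if_pos hlt, hget, h, hbk, hfw]
      have hstepB : pvBLoop choice query ('R' :: p.drop (i+1)) acc cp qp c0 q0 inr false
          = pvBLoop choice query (p.drop (i+1)) acc (cp+1) (qp+1) (if inr = true then c0 else cp) (if inr = true then q0 else qp) true true := by
        simp [pvBLoop]
      have hsplit2 : p.drop (i+1) = (p.drop (i+1)).takeWhile pvIDR ++ (p.drop (i+1)).dropWhile pvIDR :=
        (List.takeWhile_append_dropWhile).symm
      have hdropPR : p.drop ((i+1) + ((p.drop (i+1)).takeWhile pvIDR).length) = (p.drop (i+1)).dropWhile pvIDR := by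
        rw [← List.drop_drop]
        nth_rewrite 2 [hsplit2]
        exact List.drop_left
      rw [hstepA, hdrop, h, hstepB, hC, hQ]
      conv_rhs => rw [hsplit2, pvBLoop_run choice query _ _ hrun]
      rcases hs2 with hnil | ⟨ch, t, hct, hcf⟩
      · -- the run reaches the end of the prescription
        have hstop : p.length ≤ (i+1) + ((p.drop (i+1)).takeWhile pvIDR).length := by
          have := hdropPR
          rw [hnil] at this
          exact List.drop_eq_nil_iff.mp this
        rw [pvAMain_stop p choice query f _ _ _ _ hstop, hnil]
        simp [pvBLoop]
      · -- the run is closed by an 'M'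
        have hPRlt : (i+1) + ((p.drop (i+1)).takeWhile pvIDR).length < p.length := by
          by_contra hcon
          push_neg at hcon
          have hdn : p.drop ((i+1) + ((p.drop (i+1)).takeWhile pvIDR).length) = [] :=
            List.drop_eq_nil_of_le hcon
          rw [hdropPR, hct] at hdn
          exact absurd hdn (List.cons_ne_nil _ _)
        have hdr2 : p.drop ((i+1) + ((p.drop (i+1)).takeWhile pvIDR).length)
            = p[(i+1) + ((p.drop (i+1)).takeWhile pvIDR).length] :: p.drop ((i+1) + ((p.drop (i+1)).takeWhile pvIDR).length + 1) :=
          List.drop_eq_getElem_cons hPRlt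
        have hchp : p[(i+1) + ((p.drop (i+1)).takeWhile pvIDR).length] = ch ∧ t = p.drop ((i+1) + ((p.drop (i+1)).takeWhile pvIDR).length + 1) := by
          have hcc := (hdropPR.symm.trans hdr2)
          rw [hct] at hcc
          exact ⟨(List.cons.inj hcc).1.symm, (List.cons.inj hcc).2⟩
        have hchM : ch = 'M' := by
          have hmemd : ch ∈ p.drop ((i+1) + ((p.drop (i+1)).takeWhile pvIDR).length) := by
            rw [hdropPR, hct]; simp
          have hmem : ch ∈ p := List.mem_of_mem_drop hmemd
          rcases hp ch hmem with h2 | h2 | h2 | h2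
          · exact h2
          all_goals (rw [h2] at hcf; simp [pvIDR] at hcf)
        obtain ⟨g, rfl⟩ : ∃ g, f = g + 1 := ⟨f - 1, by omega⟩
        have hbackPR : ((p.take ((i+1) + ((p.drop (i+1)).takeWhile pvIDR).length + 1)).reverse.takeWhile pvIDR) = [] := by
          have ht2 : (p.take ((i+1) + ((p.drop (i+1)).takeWhile pvIDR).length + 1)).reverse
              = p[(i+1) + ((p.drop (i+1)).takeWhile pvIDR).length] :: (p.take ((i+1) + ((p.drop (i+1)).takeWhile pvIDR).length)).reverse := by
            rw [List.take_add_one]; simp [hPRlt]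
          rw [ht2, hchp.1, hchM]
          simp [pvIDR]
        rw [pvAMain_stepM p choice query g ((i+1) + ((p.drop (i+1)).takeWhile pvIDR).length)
              ((cp+1) + ((((p.drop (i+1)).takeWhile pvIDR).count 'D' : Int) + (((p.drop (i+1)).takeWhile pvIDR).count 'R' : Int)))
              ((qp+1) + ((((p.drop (i+1)).takeWhile pvIDR).count 'I' : Int) + (((p.drop (i+1)).takeWhile pvIDR).count 'R' : Int)))
              _ hPRlt (hchM ▸ hchp.1),
          IH g (by omega) ((i+1) + ((p.drop (i+1)).takeWhile pvIDR).length + 1)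
              ((cp+1) + ((((p.drop (i+1)).takeWhile pvIDR).count 'D' : Int) + (((p.drop (i+1)).takeWhile pvIDR).count 'R' : Int)) + 1)
              ((qp+1) + ((((p.drop (i+1)).takeWhile pvIDR).count 'I' : Int) + (((p.drop (i+1)).takeWhile pvIDR).count 'R' : Int)) + 1)
              _
              ((cp+1) + ((((p.drop (i+1)).takeWhile pvIDR).count 'D' : Int) + (((p.drop (i+1)).takeWhile pvIDR).count 'R' : Int)) + 1)
              ((qp+1) + ((((p.drop (i+1)).takeWhile pvIDR).count 'I' : Int) + (((p.drop (i+1)).takeWhile pvIDR).count 'R' : Int)) + 1)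
              false (by omega) (by omega)
              (by rw [hbackPR]; simp)
              (by rw [hbackPR]; simp)
              (by rw [hbackPR]; simp)
              (by rw [hbackPR]; simp)]
        rw [hct, hchM]
        have hstepB2 : ∀ (X Y : Int),
            pvBLoop choice query ('M' :: t) acc X Y (cp - (((p.take i).reverse.takeWhile pvIDR).count 'D' : Int)) (qp - (((p.take i).reverse.takeWhile pvIDR).count 'I' : Int)) true true
            = pvBLoop choice query t
                (acc ++ [[PySem.Str.slice choice (some (cp - (((p.take i).reverse.takeWhile pvIDR).count 'D' : Int))) (some X),
                          PySem.Str.slice query (some (qp - (((p.take i).reverse.takeWhile pvIDR).count 'I' : Int))) (some Y)]])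
                (X+1) (Y+1) (cp - (((p.take i).reverse.takeWhile pvIDR).count 'D' : Int)) (qp - (((p.take i).reverse.takeWhile pvIDR).count 'I' : Int)) false false := by
          intro X Y
          simp [pvBLoop]
        rw [hstepB2, hchp.2]
        exact pvBLoop_c0_irrel choice query _ _ _ _ _ _ _ _ false
    · -- p[i] = 'I'
      have hstepA : pvAMain p choice query (f+1) i cp qp acc = pvAMain p choice query f (i+1) cp (qp+1) acc := by
        simp [pvAMain, if_pos hlt, hget, h]
      have hback : ((p.take (i+1)).reverse.takeWhile pvIDR) = 'I' :: ((p.take i).reverse.takeWhile pvIDR) := by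
        rw [htake, h]; simp [List.takeWhile_cons, pvIDR]
      rw [hstepA,
        IH f (by omega) (i+1) cp (qp+1) acc (if inr = true then c0 else cp) (if inr = true then q0 else qp) true (by omega) (by omega)
          (by rw [hback]; simp [hR])
          (by rw [hback, hC]; simp [List.count_cons])
          (by rw [hback, hQ]; simp [List.count_cons])
          (by rw [hback]; simp)]
      rw [hdrop, h]
      have hstepB : pvBLoop choice query ('I' :: p.drop (i+1)) acc cp qp c0 q0 inr false
          = pvBLoop choice query (p.drop (i+1)) acc cp (qp+1) (if inr = true then c0 else cp) (if inr = true then q0 else qp) true false := by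
        simp [pvBLoop]
      rw [hstepB]
    · -- p[i] = 'D'
      have hstepA : pvAMain p choice query (f+1) i cp qp acc = pvAMain p choice query f (i+1) (cp+1) qp acc := by
        simp [pvAMain, if_pos hlt, hget, h]
      have hback : ((p.take (i+1)).reverse.takeWhile pvIDR) = 'D' :: ((p.take i).reverse.takeWhile pvIDR) := by
        rw [htake, h]; simp [List.takeWhile_cons, pvIDR]
      rw [hstepA,
        IH f (by omega) (i+1) (cp+1) qp acc (if inr = true then c0 else cp) (if inr = true then q0 else qp) true (by omega) (by omega)
          (by rw [hback]; simp [hR])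
          (by rw [hback, hC]; simp [List.count_cons])
          (by rw [hback, hQ]; simp [List.count_cons])
          (by rw [hback]; simp)]
      rw [hdrop, h]
      have hstepB : pvBLoop choice query ('D' :: p.drop (i+1)) acc cp qp c0 q0 inr false
          = pvBLoop choice query (p.drop (i+1)) acc (cp+1) qp (if inr = true then c0 else cp) (if inr = true then q0 else qp) true false := by
        simp [pvBLoop]
      rw [hstepB]
  · have hie : p.length ≤ i := by omega
    rw [pvAMain_stop p choice query fuel i cp qp acc hie]
    rw [List.drop_eq_nil_of_le hie]
    cases hib : ((p.take i).reverse.takeWhile pvIDR).isEmpty with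
    | true => rw [hinr, hib]; simp [pvBLoop]
    | false => rw [hinr, hib]; simp [pvBLoop]

-- ===== VERDICT (by name: the statement is the Claim_ definition above) =====
theorem replacement_search_spec : Claim_equal_replacement_search := by
  intro prescription choice query _hdom hpre
  unfold Spec_replacement_search replacement_search replacement_search_alt
  have hp : ∀ c ∈ prescription.toList, c = 'M' ∨ c = 'R' ∨ c = 'I' ∨ c = 'D' := by
    intro c hc
    have hb := (List.all_eq_true.mp hpre) c hc
    simp at hb
    tauto
  have hmain := pvMain_eq prescription.toList choice query hp (prescription.toList.length + 1)
    0 0 0 [] 0 0 false (by omega) (by omega) (by simp) (by simp) (by simp) (by simp)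
  simpa using hmain
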